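-- pv_equiv track=rewrite | github.com/Donkere-vader/CLPoker | server.py | get_next_in_dict
-- ===== SOURCE A (Python) =====
-- def get_next_in_dict(cur, dct):
--     nxt_one = False
--     for i in dct:
--         if nxt_one:
--             return i
--         elif i == cur:
--             nxt_one = True
--     return next(iter(dct))
-- ===== SOURCE B (Python) =====
-- def get_next_in_dict(cur, dct):
--     keys = list(dct)
--     if cur in keys:
--         return keys[(keys.index(cur) + 1) % len(keys)]
--     return next(iter(dct))
-- ===== Notes on version B (the rewrite author's own statement) =====
-- stated objective: simpler
-- what changed: Replaces the streaming found-flag loop by a closed-form modular wrap: locate cur's first index in the key list and return the key at (index+1) mod len, with next(iter(dct)) as the absent-cur fallback.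
import Mathlib
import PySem

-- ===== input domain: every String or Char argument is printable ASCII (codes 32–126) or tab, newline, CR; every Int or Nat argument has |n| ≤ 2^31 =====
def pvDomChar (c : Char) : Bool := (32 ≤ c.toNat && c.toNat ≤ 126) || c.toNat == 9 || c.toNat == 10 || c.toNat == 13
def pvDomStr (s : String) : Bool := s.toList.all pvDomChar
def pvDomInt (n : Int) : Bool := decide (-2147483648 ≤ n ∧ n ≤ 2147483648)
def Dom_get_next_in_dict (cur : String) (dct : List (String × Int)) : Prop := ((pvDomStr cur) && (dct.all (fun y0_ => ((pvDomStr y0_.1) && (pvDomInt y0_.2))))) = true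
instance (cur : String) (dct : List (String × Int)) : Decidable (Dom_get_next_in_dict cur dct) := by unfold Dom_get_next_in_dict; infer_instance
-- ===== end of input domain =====

-- B replaces A's streaming found-flag loop by a closed-form modular wrap over the key list (objective: simpler).


-- ===== PORT A =====
-- the for-loop with its nxt_one flag; `some k` = the `return i` inside the loop
def goA (cur : String) : List String → Bool → Option String
  | [], _ => none
  | k :: rest, b => if b then some k else goA cur rest (k == cur)

def get_next_in_dict (cur : String) (dct : List (String × Int)) : String :=
  match goA cur (dct.map Prod.fst) false with
  | some s => s
  | none => (dct.map Prod.fst).headD ""   -- return next(iter(dct)); empty dict raises (excluded by Pre_)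

-- ===== PORT B =====
def get_next_in_dict_alt (cur : String) (dct : List (String × Int)) : String :=
  let keys := dct.map Prod.fst
  match PySem.List.index? keys cur with
  | some i => (keys[(i + 1) % keys.length]?).getD ""   -- keys[(keys.index(cur)+1) % len(keys)]
  | none => keys.headD ""                                   -- next(iter(dct)); empty dict raises (excluded by Pre_)

-- ===== PRECONDITION & SPEC =====
-- A (and B) raise StopIteration on the empty dict; that is the only raising input.
def Pre_get_next_in_dict (cur : String) (dct : List (String × Int)) : Prop := dct ≠ []
instance (cur : String) (dct : List (String × Int)) : Decidable (Pre_get_next_in_dict cur dct) := by unfold Pre_get_next_in_dict; infer_instance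
def pvWitness_get_next_in_dict : String × (List (String × Int)) := ("a", [("a", 1), ("b", 2)])

def Spec_get_next_in_dict (cur : String) (dct : List (String × Int)) (out : String) : Prop := out = get_next_in_dict_alt cur dct
instance (cur : String) (dct : List (String × Int)) (out : String) : Decidable (Spec_get_next_in_dict cur dct out) := by unfold Spec_get_next_in_dict; infer_instance

-- ===== CLAIM (what is proved, stated in full; the proofs are below) =====
def Claim_equal_get_next_in_dict : Prop := ∀ (cur : String) (dct : List (String × Int)), Dom_get_next_in_dict cur dct → Pre_get_next_in_dict cur dct → Spec_get_next_in_dict cur dct (get_next_in_dict cur dct)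

-- ===== LEMMAS AND PROOFS =====

theorem goA_not_mem (cur : String) (keys : List String) (h : cur ∉ keys) :
    goA cur keys false = none := by
  induction keys with
  | nil => rfl
  | cons k rest ih =>
    simp only [List.mem_cons, not_or] at h
    simp [goA, beq_eq_false_iff_ne.2 (fun hk => h.1 hk.symm)]
    exact ih h.2

theorem goA_true (cur : String) (l : List String) : goA cur l true = l.head? := by
  cases l <;> rfl

theorem goA_found (cur : String) (pre suf : List String) (h : cur ∉ pre) :
    goA cur (pre ++ cur :: suf) false = suf.head? := by
  induction pre with
  | nil => simp [goA, goA_true]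
  | cons k rest ih =>
    simp only [List.mem_cons, not_or] at h
    simp only [List.cons_append, goA, beq_eq_false_iff_ne.2 (Ne.symm h.1)]
    exact ih h.2

theorem main_lemma (cur : String) (keys : List String) :
    (match goA cur keys false with
     | some s => s
     | none => keys.headD "") =
    (match PySem.List.index? keys cur with
     | some i => (keys[(i + 1) % keys.length]?).getD ""
     | none => keys.headD "") := by
  cases hidx : PySem.List.index? keys cur with
  | none =>
    rw [goA_not_mem cur keys ((PySem.List.index?_eq_none_iff keys cur).1 hidx)]
  | some i =>
    obtain ⟨pre, suf, hkeq, hlen, hnm⟩ := (PySem.List.index?_eq_some_iff keys cur i).1 hidx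
    subst hkeq
    rw [goA_found cur pre suf hnm]
    cases suf with
    | nil =>
      have hl : (i + 1) % (pre ++ [cur]).length = 0 := by
        simp [← hlen]
      simp only [List.head?_nil, hl]
      cases pre with
      | nil => simp
      | cons p ps => simp
    | cons x rest =>
      have hlt : (i + 1) % (pre ++ cur :: x :: rest).length = i + 1 := by
        apply Nat.mod_eq_of_lt; simp [← hlen]
      have hget : (pre ++ cur :: x :: rest)[i + 1]? = some x := by
        rw [← hlen]
        rw [show pre ++ cur :: x :: rest = (pre ++ [cur]) ++ x :: rest by simp]
        rw [List.getElem?_append_right (by simp)]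
        simp
      simp only [List.head?_cons, hlt, hget, Option.getD_some]

-- ===== VERDICT (by name: the statement is the Claim_ definition above) =====
theorem get_next_in_dict_spec : Claim_equal_get_next_in_dict := by
  intro cur dct _ _
  unfold Spec_get_next_in_dict get_next_in_dict get_next_in_dict_alt
  exact main_lemma cur (dct.map Prod.fst)
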